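-- pv_equiv track=rewrite | github.com/ludekla/mlgrus | pytemp/mapred.py | matrix_multiply_reducer
-- ===== SOURCE A (Python) =====
-- from collections import Counter, defaultdict
-- from typing import List, Iterator, Tuple, Iterable, Callable, Any, NamedTuple
--
-- def matrix_multiply_reducer(key: Tuple[int, int], indexed_values: Iterable[Tuple[int, int]]):
--     results_by_index = defaultdict(list)
--     for index, value in indexed_values:
--         results_by_index[index].append(value)
--     sumproduct = sum(
--         values[0]*values[1] for values in results_by_index.values()
--         if len(values) == 2
--     )
--     if sumproduct != 0.0:
--         yield key, sumproduct
-- ===== SOURCE B (Python) =====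
-- def matrix_multiply_reducer(key, indexed_values):
--     # Repeated-partition algorithm: no dict at all.  While items remain, peel off
--     # the whole group sharing the first item's index (a pair-partition of the list),
--     # add that group's contribution if it has exactly two values, and continue on
--     # the items with a different index.  Groups are consumed in first-occurrence
--     # order, exactly the insertion order of A's defaultdict.
--     items = list(indexed_values)
--     sumproduct = 0
--     while items:
--         idx = items[0][0]
--         vs = [v for i, v in items if i == idx]
--         if len(vs) == 2:
--             sumproduct += vs[0] * vs[1]
--         items = [(i, v) for i, v in items if i != idx]
--     if sumproduct != 0.0:
--         yield key, sumproduct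
-- ===== Notes on version B (the rewrite author's own statement) =====
-- stated objective: alternative
-- what changed: A builds a defaultdict of per-index value lists in one pass and then scans the dict's values; B uses no dictionary at all: it repeatedly partitions the remaining item list on the first item's index, adds that group's product when the group has exactly two values, and recurs on the rest (first-occurrence order, so the same result).
import Mathlib
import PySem

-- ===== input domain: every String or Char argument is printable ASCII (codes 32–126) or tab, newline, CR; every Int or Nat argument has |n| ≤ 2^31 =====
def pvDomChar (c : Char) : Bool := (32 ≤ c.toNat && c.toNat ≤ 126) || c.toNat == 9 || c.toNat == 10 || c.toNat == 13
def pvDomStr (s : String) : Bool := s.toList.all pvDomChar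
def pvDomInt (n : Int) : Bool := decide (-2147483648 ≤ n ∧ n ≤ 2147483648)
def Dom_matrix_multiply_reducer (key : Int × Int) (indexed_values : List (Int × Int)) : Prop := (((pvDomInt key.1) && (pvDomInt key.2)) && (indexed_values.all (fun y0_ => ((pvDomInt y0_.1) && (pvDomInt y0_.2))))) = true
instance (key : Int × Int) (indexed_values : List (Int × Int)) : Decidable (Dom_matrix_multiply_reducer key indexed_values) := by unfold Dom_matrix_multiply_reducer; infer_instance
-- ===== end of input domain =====

-- B drops A's defaultdict grouping entirely: it repeatedly partitions the remaining item list on the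
-- first item's index and sums the two-value groups' products in first-occurrence order (same values).
-- Both generators are modelled by the list of their yields.

-- ===== PORT A =====
def matrix_multiply_reducer (key : Int × Int) (indexed_values : List (Int × Int)) : List ((Int × Int) × Int) :=
  let results_by_index :=
    indexed_values.foldl (fun d p => d.modify p.1 [] (· ++ [p.2])) PySem.Dict.empty
  let sumproduct : Int :=
    results_by_index.values.foldl
      (fun s values =>
        if values.length == 2 then s + PySem.List.pyGetD values 0 0 * PySem.List.pyGetD values 1 0
        else s) 0
  if sumproduct ≠ 0 then [(key, sumproduct)] else []

-- ===== PORT B =====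
-- the while loop of Source B: state = (remaining items, running sumproduct)
def pvLoop : List (Int × Int) → Int → Int
  | [], s => s
  | x :: t, s =>
      let vs := ((x :: t).filter (fun p => p.1 == x.1)).map Prod.snd
      let s' := if vs.length == 2 then s + PySem.List.pyGetD vs 0 0 * PySem.List.pyGetD vs 1 0 else s
      pvLoop ((x :: t).filter (fun p => !(p.1 == x.1))) s'
termination_by items _ => items.length
decreasing_by
  simp only [List.filter_cons, BEq.rfl, Bool.not_true, List.length_cons]
  exact Nat.lt_succ_of_le (List.length_filter_le _ _)

def matrix_multiply_reducer_alt (key : Int × Int) (indexed_values : List (Int × Int)) : List ((Int × Int) × Int) :=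
  let sumproduct := pvLoop indexed_values 0
  if sumproduct ≠ 0 then [(key, sumproduct)] else []

-- ===== PRECONDITION & SPEC =====
def Spec_matrix_multiply_reducer (key : Int × Int) (indexed_values : List (Int × Int)) (out : List ((Int × Int) × Int)) : Prop := out = matrix_multiply_reducer_alt key indexed_values
instance (key : Int × Int) (indexed_values : List (Int × Int)) (out : List ((Int × Int) × Int)) : Decidable (Spec_matrix_multiply_reducer key indexed_values out) := by unfold Spec_matrix_multiply_reducer; infer_instance

-- ===== CLAIM (what is proved, stated in full; the proofs are below) =====
def Claim_equal_matrix_multiply_reducer : Prop := ∀ (key : Int × Int) (indexed_values : List (Int × Int)), Dom_matrix_multiply_reducer key indexed_values → Spec_matrix_multiply_reducer key indexed_values (matrix_multiply_reducer key indexed_values)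

-- ===== LEMMAS AND PROOFS =====

-- filtering a Python set built from a list is the set of the filtered list
lemma pv_filter_ofList (p : Int → Bool) (l : List Int) :
    (PySem.Set.ofList l).filter p = PySem.Set.ofList (l.filter p) := by
  induction l using List.reverseRecOn with
  | nil => rfl
  | append_singleton l x ih =>
    rw [PySem.Set.ofList_append_singleton, PySem.Set.add_eq_ite, List.filter_append]
    by_cases hp : p x
    · rw [show List.filter p [x] = [x] by simp [hp], PySem.Set.ofList_append_singleton,
          PySem.Set.add_eq_ite]
      by_cases hx : x ∈ l
      · simp [PySem.Set.mem_ofList, hx, hp, ih, List.mem_filter]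
      · simp [PySem.Set.mem_ofList, hx, hp, ih, List.mem_filter, List.filter_append]
    · rw [show List.filter p [x] = [] by simp [hp], List.append_nil]
      by_cases hx : x ∈ l
      · simp [PySem.Set.mem_ofList, hx, ih]
      · simp [PySem.Set.mem_ofList, hx, hp, ih, List.filter_append]

lemma pv_discard_ofList (l : List Int) (a : Int) :
    PySem.Set.discard (PySem.Set.ofList l) a
      = PySem.Set.ofList (l.filter (fun y => !(y == a))) := by
  have h := pv_filter_ofList (fun y => !(y == a)) l
  simpa [PySem.Set.discard] using h

-- A's sum over the dict's value lists (keys in first-occurrence order, each list the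
-- filtered values of its key) equals B's repeated-partition while loop
lemma pv_main (ivs : List (Int × Int)) (s : Int) :
    ((PySem.Set.ofList (ivs.map Prod.fst)).map
        (fun k => (ivs.filter (fun p => p.1 == k)).map Prod.snd)).foldl
      (fun s values =>
        if values.length == 2 then s + PySem.List.pyGetD values 0 0 * PySem.List.pyGetD values 1 0
        else s) s = pvLoop ivs s := by
  induction ivs, s using pvLoop.induct with
  | case1 s => simp [pvLoop]
  | case2 x t s vs s' ih =>
    rw [pvLoop]
    have hhead : (x::t).filter (fun p => !(p.1 == x.1)) = t.filter (fun p => !(p.1 == x.1)) := by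
      simp
    rw [hhead] at ih ⊢
    have hkeys : PySem.Set.ofList ((x::t).map Prod.fst)
        = x.1 :: PySem.Set.ofList ((t.filter (fun p => !(p.1 == x.1))).map Prod.fst) := by
      rw [List.map_cons, PySem.Set.ofList_cons, pv_discard_ofList, List.filter_map]
      rfl
    rw [hkeys, List.map_cons, List.foldl_cons]
    have hmc : (PySem.Set.ofList ((t.filter (fun p => !(p.1 == x.1))).map Prod.fst)).map
          (fun k => ((x::t).filter (fun p => p.1 == k)).map Prod.snd)
        = (PySem.Set.ofList ((t.filter (fun p => !(p.1 == x.1))).map Prod.fst)).map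
          (fun k => ((t.filter (fun p => !(p.1 == x.1))).filter (fun p => p.1 == k)).map Prod.snd) := by
      apply List.map_congr_left; intro k hk
      have hkne : ¬(k = x.1) := by
        have h1 := (PySem.Set.mem_ofList _ _).mp hk
        obtain ⟨p, hp, rfl⟩ := List.mem_map.mp h1
        have h2 := (List.mem_filter.mp hp).2
        simpa using h2
      have h3 : ((x.1 : Int) == k) = false := by simp [Ne.symm hkne]
      congr 1
      rw [List.filter_cons]
      simp only [h3, if_neg, Bool.false_eq_true, not_false_iff, List.filter_filter]
      apply List.filter_congr
      intro a _
      by_cases h : a.1 = k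
      · simp [h, hkne]
      · simp [h]
    rw [hmc]
    exact ih

-- ===== VERDICT (by name: the statement is the Claim_ definition above) =====
theorem matrix_multiply_reducer_spec : Claim_equal_matrix_multiply_reducer := by
  intro key ivs _
  simp only [Spec_matrix_multiply_reducer, matrix_multiply_reducer, matrix_multiply_reducer_alt]
  have hnd : (ivs.foldl (fun d p => d.modify p.1 [] (· ++ [p.2])) PySem.Dict.empty).keys.Nodup :=
    PySem.Dict.nodup_keys_foldl_modify_key ivs Prod.fst [] (fun _ p => (· ++ [p.2])) _
      PySem.Dict.nodup_keys_empty
  have hkeys : (ivs.foldl (fun d p => d.modify p.1 [] (· ++ [p.2])) PySem.Dict.empty).keys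
      = PySem.Set.ofList (ivs.map Prod.fst) := by
    rw [PySem.Dict.keys_foldl_modify_key]
    simp [PySem.Set.update_nil_left]
  have hvals : (ivs.foldl (fun d p => d.modify p.1 [] (· ++ [p.2])) PySem.Dict.empty).values
      = (PySem.Set.ofList (ivs.map Prod.fst)).map
          (fun k => (ivs.filter (fun p => p.1 == k)).map Prod.snd) := by
    rw [PySem.Dict.values_eq_map_keys _ hnd [], hkeys]
    apply List.map_congr_left
    intro k _
    rw [PySem.Dict.getD_foldl_modify_append]
    simp
  rw [hvals, pv_main]
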